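-- pv_equiv track=rewrite | github.com/lantunes/netomaton | demos/hopfield_tank_tsp/spike.py | get_cell_label_map
-- ===== SOURCE A (Python) =====
-- def get_cell_label_map(points):
--     """
--     Returns a dictionary where the keys are the cell indices (there are n^2 cells, where n is the number of points),
--     and the values are a tuple (row, col), representing the row index and column index of the cell in the permutation
--     matrix (the matrix describing the tour, where each row represents a point, and each column represents the position
--     of that point in the tour.
--     :param points: a list of tuples, where each tuple represents a point's x and y coordinates
--     :return: a dictionary with cell indices as keys and tuple (row, col) for the position of the cell in the permutation
--              matrix as values
--     """
--     cell_label_map = {}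
--     num_points = len(points)
--     current_point = 0
--     current_cell = 0
--     while current_point < num_points:
--         for n in range(num_points):
--             cell_label_map[current_cell] = (current_point, n)
--             current_cell += 1
--         current_point += 1
--     return cell_label_map
-- ===== SOURCE B (Python) =====
-- def get_cell_label_map(points):
--     n = len(points)
--     return {i: divmod(i, n) for i in range(n * n)}
-- ===== Notes on version B (the rewrite author's own statement) =====
-- stated objective: simpler
-- what changed: Replaces the nested while/for with a running cell counter by a single dict comprehension over range(n*n) that computes each cell's (row, col) arithmetically as divmod(i, n).
import Mathlib
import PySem

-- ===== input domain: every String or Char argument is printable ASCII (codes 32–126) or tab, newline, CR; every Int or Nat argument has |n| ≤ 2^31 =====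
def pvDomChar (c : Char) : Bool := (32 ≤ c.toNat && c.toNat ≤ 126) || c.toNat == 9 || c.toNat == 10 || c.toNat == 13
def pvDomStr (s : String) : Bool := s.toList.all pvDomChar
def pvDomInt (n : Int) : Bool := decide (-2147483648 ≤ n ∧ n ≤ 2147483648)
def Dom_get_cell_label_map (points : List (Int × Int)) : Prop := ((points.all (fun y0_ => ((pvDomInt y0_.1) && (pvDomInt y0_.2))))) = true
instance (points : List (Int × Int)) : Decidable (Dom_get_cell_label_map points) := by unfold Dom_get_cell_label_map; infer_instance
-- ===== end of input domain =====

-- B replaces A's nested while/for with a running cell counter by a single pass over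
-- range(n*n), computing each cell's (row, col) as divmod(i, n) (objective: simpler).

-- ===== PORT A =====
-- inner 'for n in range(num_points)' loop: state = (cell_label_map, current_cell)
def pvAInner (num_points : Nat) (current_point : Int)
    (st : PySem.Dict Int (Int × Int) × Int) : PySem.Dict Int (Int × Int) × Int :=
  (PySem.List.pyRange 0 num_points 1).foldl
    (fun st n => (st.1.insert st.2 (current_point, n), st.2 + 1)) st

-- outer 'while current_point < num_points' loop; runs exactly num_points times
-- (current_point starts at 0 and increases by 1 each iteration), so fuel = remaining iterations
def pvAOuter (num_points : Nat) : Nat → Int → (PySem.Dict Int (Int × Int) × Int) → PySem.Dict Int (Int × Int)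
  | 0, _, st => st.1
  | k+1, cp, st => pvAOuter num_points k (cp + 1) (pvAInner num_points cp st)

def get_cell_label_map (points : List (Int × Int)) : List (Int × Int × Int) :=
  (pvAOuter points.length points.length 0 (PySem.Dict.empty, 0)).items

-- ===== PORT B =====
def get_cell_label_map_alt (points : List (Int × Int)) : List (Int × Int × Int) :=
  (PySem.List.pyRange 0 ((points.length : Int) * (points.length : Int)) 1).map
    (fun i => (i, PySem.Int.floordiv i (points.length : Int), PySem.Int.mod i (points.length : Int)))

-- ===== PRECONDITION & SPEC =====
def Spec_get_cell_label_map (points : List (Int × Int)) (out : List (Int × Int × Int)) : Prop := out = get_cell_label_map_alt points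
instance (points : List (Int × Int)) (out : List (Int × Int × Int)) : Decidable (Spec_get_cell_label_map points out) := by unfold Spec_get_cell_label_map; infer_instance

-- ===== CLAIM (what is proved, stated in full; the proofs are below) =====
def Claim_equal_get_cell_label_map : Prop := ∀ (points : List (Int × Int)), Dom_get_cell_label_map points → Spec_get_cell_label_map points (get_cell_label_map points)

-- ===== LEMMAS AND PROOFS =====

lemma pvInner_spec (n : Nat) (cp cc : Int) (d : PySem.Dict Int (Int × Int))
    (h : ∀ p ∈ d.items, p.1 < cc) :
    pvAInner n cp (d, cc) =
      (PySem.Dict.mk (d.items ++ (List.range n).map (fun j : Nat => ((cc + (j : Int)), (cp, (j : Int))))), cc + n) := by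
  induction n with
  | zero =>
    simp only [pvAInner, Nat.cast_zero, PySem.List.pyRange_one, Int.sub_zero, Int.toNat_zero,
      List.range_zero, List.map_nil, List.foldl_nil, List.append_nil, add_zero]
  | succ n ih =>
    have hsr : PySem.List.pyRange 0 ((n : Int) + 1) = PySem.List.pyRange 0 (n : Int) ++ [(n : Int)] :=
      PySem.List.pyRange_one_succ_right (by positivity)
    have hfresh : (PySem.Dict.mk (d.items ++ (List.range n).map
        (fun j : Nat => ((cc + (j : Int)), (cp, (j : Int)))))).contains (cc + (n : Int)) = false := by
      rw [PySem.Dict.contains_mk]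
      simp only [List.any_eq_false]
      intro p hp
      rcases List.mem_append.mp hp with hp | hp
      · have := h p hp; simp only [beq_iff_eq]; omega
      · obtain ⟨j, hj, rfl⟩ := List.mem_map.mp hp
        have hjn := List.mem_range.mp hj
        simp only [beq_iff_eq]
        intro hc
        omega
    simp only [pvAInner] at ih ⊢
    rw [show ((n + 1 : Nat) : Int) = (n : Int) + 1 by push_cast; ring, hsr,
      List.foldl_append, ih]
    simp only [List.foldl_cons, List.foldl_nil]
    refine Prod.ext ?_ ?_
    · apply PySem.Dict.ext
      rw [PySem.Dict.items_insert_of_not_contains _ _ hfresh]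
      simp [List.range_succ, List.append_assoc]
    · push_cast; ring

lemma pvOuter_spec (n : Nat) (k : Nat) (cp cc : Int) (d : PySem.Dict Int (Int × Int))
    (h : ∀ p ∈ d.items, p.1 < cc) :
    (pvAOuter n k cp (d, cc)).items =
      d.items ++ (List.range k).flatMap
        (fun i : Nat => (List.range n).map (fun j : Nat => ((cc + (i : Int) * (n : Int) + (j : Int)), (cp + (i : Int), (j : Int))))) := by
  induction k generalizing cp cc d with
  | zero => simp [pvAOuter]
  | succ k ih =>
    simp only [pvAOuter]
    rw [pvInner_spec n cp cc d h]
    have h' : ∀ p ∈ (PySem.Dict.mk (d.items ++ (List.range n).map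
        (fun j : Nat => ((cc + (j : Int)), (cp, (j : Int)))))).items, p.1 < cc + (n : Int) := by
      intro p hp
      rcases List.mem_append.mp hp with hp | hp
      · have := h p hp; omega
      · obtain ⟨j, hj, rfl⟩ := List.mem_map.mp hp
        have := List.mem_range.mp hj
        simp only
        omega
    rw [ih (cp + 1) (cc + (n : Int)) _ h']
    simp only [List.range_succ_eq_map, List.flatMap_cons, List.flatMap_map, Nat.cast_zero,
      Nat.cast_succ, List.append_assoc]
    congr 1
    have hf : (fun i : Nat => List.map (fun j : Nat =>
          ((cc + (n : Int) + (i : Int) * (n : Int) + (j : Int)), (cp + 1 + (i : Int), (j : Int)))) (List.range n))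
          = (fun a : Nat => List.map (fun j : Nat =>
          ((cc + ((a : Int) + 1) * (n : Int) + (j : Int)), (cp + ((a : Int) + 1), (j : Int)))) (List.range n)) := by
        funext i
        apply List.map_congr_left
        intro j _
        simp only [Prod.mk.injEq]
        exact ⟨by ring, by ring, trivial⟩
    rw [hf]
    simp

lemma pvRangeMul (n m : Nat) (f : Nat → (Int × Int × Int)) :
    (List.range (m * n)).map f =
      (List.range m).flatMap (fun i : Nat => (List.range n).map (fun j => f (i * n + j))) := by
  induction m with
  | zero => simp
  | succ m ih =>
    rw [Nat.succ_mul, List.range_add, List.map_append, List.map_map, ih, List.range_succ]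
    simp [Function.comp]

-- ===== VERDICT (by name: the statement is the Claim_ definition above) =====
theorem get_cell_label_map_spec : Claim_equal_get_cell_label_map := by
  intro points _
  unfold Spec_get_cell_label_map get_cell_label_map get_cell_label_map_alt
  have hempty : ∀ p ∈ (PySem.Dict.empty : PySem.Dict Int (Int × Int)).items, p.1 < (0 : Int) := by
    simp [PySem.Dict.empty]
  rw [pvOuter_spec points.length points.length 0 0 _ hempty]
  set n := points.length with hn
  rw [PySem.List.pyRange_one]
  have h1 : ((n : Int) * n - 0).toNat = n * n := by
    rw [Int.sub_zero, show ((n : Int) * n) = ((n * n : Nat) : Int) by push_cast; ring,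
      Int.toNat_natCast]
  rw [h1, List.map_map, pvRangeMul n n]
  simp only [PySem.Dict.empty, List.nil_append]
  refine List.flatMap_congr ?_
  intro i hi
  apply List.map_congr_left
  intro j hj
  have hjn := List.mem_range.mp hj
  have hn0 : 0 < n := by omega
  have hdiv : (i * n + j) / n = i := by
    rw [Nat.mul_comm i n, Nat.mul_add_div hn0, Nat.div_eq_of_lt hjn, Nat.add_zero]
  have hmod : (i * n + j) % n = j := by
    rw [Nat.add_comm, Nat.add_mul_mod_self_right, Nat.mod_eq_of_lt hjn]
  simp only [Function.comp, zero_add, PySem.Int.floordiv_natCast, PySem.Int.mod_natCast, hdiv, hmod,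
    Prod.mk.injEq]
  exact ⟨by push_cast; ring, trivial⟩
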